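-- pv_equiv track=rewrite | github.com/cminst/SimpleDeco | script/compare_trajs.py | _resolve_focus_index
-- ===== SOURCE A (Python) =====
-- from typing import Any, Dict, Iterable, List, Tuple
--
-- def _resolve_focus_index(labels: List[str], focus: str | None) -> int | None:
--     if focus is None:
--         return None
--     focus = focus.strip()
--     if not focus or focus.lower() in {"none", "off", "false"}:
--         return None
--     if focus.lower() == "auto":
--         return 0 if labels else None
--     if focus.isdigit():
--         idx = int(focus) - 1
--         if idx < 0 or idx >= len(labels):
--             raise ValueError(f"--focus index out of range: {focus}")
--         return idx
--     if focus in labels: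
--         return labels.index(focus)
--     lowered = [label.lower() for label in labels]
--     focus_lower = focus.lower()
--     if focus_lower in lowered:
--         return lowered.index(focus_lower)
--     matches = [i for i, label in enumerate(lowered) if focus_lower in label]
--     if len(matches) == 1:
--         return matches[0]
--     raise ValueError(f"--focus '{focus}' did not match labels: {', '.join(labels)}")
-- ===== SOURCE B (Python) =====
-- def _resolve_focus_index(labels, focus):
--     if focus is None:
--         return None
--     focus = focus.strip()
--     if not focus or focus.lower() in {"none", "off", "false"}:
--         return None
--     fl = focus.lower()
--     if fl == "auto":
--         return 0 if labels else None
--     if focus.isdigit():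
--         idx = int(focus) - 1
--         if idx < 0 or idx >= len(labels):
--             raise ValueError(f"--focus index out of range: {focus}")
--         return idx
--     exact_idx = None
--     lower_idx = None
--     sub_matches = []
--     for i, label in enumerate(labels):
--         ll = label.lower()
--         if exact_idx is None and label == focus:
--             exact_idx = i
--         if lower_idx is None and ll == fl:
--             lower_idx = i
--         if fl in ll:
--             sub_matches.append(i)
--     if exact_idx is not None:
--         return exact_idx
--     if lower_idx is not None:
--         return lower_idx
--     if len(sub_matches) == 1:
--         return sub_matches[0]
--     raise ValueError(f"--focus '{focus}' did not match labels: {', '.join(labels)}")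
-- ===== Notes on version B (the rewrite author's own statement) =====
-- stated objective: alternative
-- what changed: The tail's three separate scans (exact membership+index, lowered membership+index, substring-match comprehension) are replaced by one single pass over enumerate(labels) that records the first exact index, the first case-insensitive index and all substring-match indices at once, then picks by precedence.
import Mathlib
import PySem

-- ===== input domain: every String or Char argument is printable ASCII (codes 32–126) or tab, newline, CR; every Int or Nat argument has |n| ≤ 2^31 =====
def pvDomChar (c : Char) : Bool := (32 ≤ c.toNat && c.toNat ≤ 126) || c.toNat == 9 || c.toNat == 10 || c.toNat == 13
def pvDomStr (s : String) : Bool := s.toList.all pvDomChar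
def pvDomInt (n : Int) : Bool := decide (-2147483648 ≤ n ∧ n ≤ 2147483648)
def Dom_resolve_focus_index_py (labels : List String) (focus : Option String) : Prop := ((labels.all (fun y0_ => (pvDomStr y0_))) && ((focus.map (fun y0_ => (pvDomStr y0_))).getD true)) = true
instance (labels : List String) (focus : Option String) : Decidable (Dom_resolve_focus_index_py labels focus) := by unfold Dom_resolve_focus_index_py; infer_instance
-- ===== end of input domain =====

-- B replaces A's tail of three separate scans by one indexing pass over the labels (objective: alternative, same cost).
-- Where the Python raises ValueError both ports return none; those inputs are excluded by Pre_.

-- ===== PORT A =====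
def resolve_focus_index_py (labels : List String) (focus : Option String) : Option Int :=
  match focus with
  | none => none
  | some f0 =>
    let f := PySem.Str.strip f0
    if f = "" ∨ PySem.Str.lower f = "none" ∨ PySem.Str.lower f = "off" ∨ PySem.Str.lower f = "false" then none
    else if PySem.Str.lower f = "auto" then (if labels = [] then none else some 0)
    else if PySem.Str.strIsdigit f then
      match PySem.Int.ofStr? f with
      | some n =>
        let idx := n - 1
        if idx < 0 ∨ (labels.length : Int) ≤ idx then none  -- raise ValueError (outside Pre_)
        else some idx
      | none => none  -- unreachable: isdigit strings parse
    else if labels.contains f then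
      (PySem.List.index? labels f).map (fun k => (k : Int))
    else
      let lowered := labels.map PySem.Str.lower
      let fl := PySem.Str.lower f
      if lowered.contains fl then
        (PySem.List.index? lowered fl).map (fun k => (k : Int))
      else
        let m := ((PySem.List.enumerate lowered 0).filter (fun p => PySem.Str.isIn fl p.2)).map (fun p => p.1)
        if m.length = 1 then m.head? else none  -- none = raise ValueError (outside Pre_)

-- ===== PORT B =====
-- the single pass of Source B: carries (exact_idx, lower_idx, sub_matches)
def pvScanB (f fl : String) (i : Int) (ls : List String) (ex lo : Option Int) (subs : List Int) :
    Option Int × Option Int × List Int :=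
  match ls with
  | [] => (ex, lo, subs)
  | l :: rest =>
    let ll := PySem.Str.lower l
    let ex' := if ex = none ∧ l = f then some i else ex
    let lo' := if lo = none ∧ ll = fl then some i else lo
    let subs' := if PySem.Str.isIn fl ll then subs ++ [i] else subs
    pvScanB f fl (i + 1) rest ex' lo' subs'

def resolve_focus_index_py_alt (labels : List String) (focus : Option String) : Option Int :=
  match focus with
  | none => none
  | some f0 =>
    let f := PySem.Str.strip f0
    if f = "" ∨ PySem.Str.lower f = "none" ∨ PySem.Str.lower f = "off" ∨ PySem.Str.lower f = "false" then none
    else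
      let fl := PySem.Str.lower f
      if fl = "auto" then (if labels = [] then none else some 0)
      else if PySem.Str.strIsdigit f then
        match PySem.Int.ofStr? f with
        | some n =>
          let idx := n - 1
          if idx < 0 ∨ (labels.length : Int) ≤ idx then none  -- raise ValueError (outside Pre_)
          else some idx
        | none => none
      else
        match pvScanB f fl 0 labels none none [] with
        | (some e, _, _) => some e
        | (none, some e, _) => some e
        | (none, none, subs) =>
          if subs.length = 1 then subs.head? else none  -- none = raise ValueError (outside Pre_)

-- ===== PRECONDITION & SPEC =====
-- Pre_ excludes exactly the inputs on which Python A raises ValueError (a digit focus whose index is out of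
-- range, or a non-digit focus with no exact, no case-insensitive and no unique substring match); B raises the
-- same ValueError there (both ports return none there).
def Pre_resolve_focus_index_py (labels : List String) (focus : Option String) : Prop :=
    let f := PySem.Str.strip (focus.getD "")
    let fl := PySem.Str.lower f
    f = "" ∨ fl = "none" ∨ fl = "off" ∨ fl = "false" ∨ fl = "auto" ∨
    (PySem.Str.strIsdigit f = true ∧ 1 ≤ (PySem.Int.ofStr? f).getD 0 ∧ (PySem.Int.ofStr? f).getD 0 ≤ (labels.length : Int)) ∨
    (PySem.Str.strIsdigit f = false ∧
      (f ∈ labels ∨ fl ∈ labels.map PySem.Str.lower ∨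
        labels.countP (fun l => PySem.Str.isIn fl (PySem.Str.lower l)) = 1))
instance (labels : List String) (focus : Option String) : Decidable (Pre_resolve_focus_index_py labels focus) := by
  unfold Pre_resolve_focus_index_py; infer_instance

def pvWitness_resolve_focus_index_py : List String × Option String := (["Alpha", "Beta"], some "beta")

def Spec_resolve_focus_index_py (labels : List String) (focus : Option String) (out : Option Int) : Prop := out = resolve_focus_index_py_alt labels focus
instance (labels : List String) (focus : Option String) (out : Option Int) : Decidable (Spec_resolve_focus_index_py labels focus out) := by unfold Spec_resolve_focus_index_py; infer_instance

-- ===== CLAIM (what is proved, stated in full; the proofs are below) =====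
def Claim_equal_resolve_focus_index_py : Prop := ∀ (labels : List String) (focus : Option String), Dom_resolve_focus_index_py labels focus → Pre_resolve_focus_index_py labels focus → Spec_resolve_focus_index_py labels focus (resolve_focus_index_py labels focus)

-- ===== LEMMAS AND PROOFS =====

-- the single pass computes the first exact index, the first lowered index and all substring indices
theorem pvScanB_spec (f fl : String) :
    ∀ (ls : List String) (i : Int) (ex lo : Option Int) (subs : List Int),
    pvScanB f fl i ls ex lo subs =
      (ex.or ((PySem.List.index? ls f).map (fun k => i + (k : Int))),
       lo.or ((PySem.List.index? (ls.map PySem.Str.lower) fl).map (fun k => i + (k : Int))),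
       subs ++ ((PySem.List.enumerate (ls.map PySem.Str.lower) i).filter (fun p => PySem.Str.isIn fl p.2)).map (fun p => p.1)) := by
  intro ls
  induction ls with
  | nil =>
    intro i ex lo subs
    simp [pvScanB, PySem.List.index?]
  | cons l rest ih =>
    intro i ex lo subs
    simp only [pvScanB, List.map_cons, PySem.List.enumerate_cons]
    rw [ih]
    congr 1
    · -- exact component
      by_cases hl : l = f
      · subst hl
        rw [PySem.List.index?_cons_self]
        cases ex with
        | none => simp
        | some e => simp
      · rw [PySem.List.index?_cons_of_ne _ hl]
        cases ex with
        | none =>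
          cases hidx : PySem.List.index? rest f with
          | none => simp [hl, hidx]
          | some k => simp [hl, hidx]; omega
        | some e => simp [hl]
    congr 1
    · -- lowered component
      by_cases hll : PySem.Str.lower l = fl
      · rw [hll, PySem.List.index?_cons_self]
        cases lo with
        | none => simp
        | some e => simp
      · rw [PySem.List.index?_cons_of_ne _ hll]
        cases lo with
        | none =>
          cases hidx : PySem.List.index? (rest.map PySem.Str.lower) fl with
          | none => simp [hll, hidx]
          | some k => simp [hll, hidx]; omega
        | some e => simp [hll]
    · -- substring component
      by_cases hin : PySem.Chars.isIn fl.toList (PySem.Chars.lower l.toList) = true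
      · simp [hin]
      · simp [hin]

-- the tail of A (three scans) equals the tail of B (one pass)
theorem tail_eq (labels : List String) (f : String) :
    (if labels.contains f then (PySem.List.index? labels f).map (fun k => (k : Int))
     else if (labels.map PySem.Str.lower).contains (PySem.Str.lower f) then
       (PySem.List.index? (labels.map PySem.Str.lower) (PySem.Str.lower f)).map (fun k => (k : Int))
     else if (((PySem.List.enumerate (labels.map PySem.Str.lower) 0).filter
                (fun p => PySem.Str.isIn (PySem.Str.lower f) p.2)).map (fun p => p.1)).length = 1 then
       (((PySem.List.enumerate (labels.map PySem.Str.lower) 0).filter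
           (fun p => PySem.Str.isIn (PySem.Str.lower f) p.2)).map (fun p => p.1)).head?
     else none)
    =
    (match pvScanB f (PySem.Str.lower f) 0 labels none none [] with
     | (some e, _, _) => some e
     | (none, some e, _) => some e
     | (none, none, subs) => if subs.length = 1 then subs.head? else none) := by
  rw [pvScanB_spec]
  cases hidx : PySem.List.index? labels f with
  | some k =>
    have hc : labels.contains f = true :=
      List.contains_iff_mem.mpr ((PySem.List.index?_isSome_iff _ _).mp (by rw [hidx]; rfl))
    rw [if_pos hc]
    simp
  | none =>
    have hnm : f ∉ labels := (PySem.List.index?_eq_none_iff _ _).mp hidx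
    have hc : ¬ (labels.contains f = true) := fun h => hnm (List.contains_iff_mem.mp h)
    rw [if_neg hc]
    cases hidx2 : PySem.List.index? (labels.map PySem.Str.lower) (PySem.Str.lower f) with
    | some k =>
      have hc2 : (labels.map PySem.Str.lower).contains (PySem.Str.lower f) = true :=
        List.contains_iff_mem.mpr ((PySem.List.index?_isSome_iff _ _).mp (by rw [hidx2]; rfl))
      rw [if_pos hc2]
      simp
    | none =>
      have hnm2 : PySem.Str.lower f ∉ labels.map PySem.Str.lower :=
        (PySem.List.index?_eq_none_iff _ _).mp hidx2
      have hc2 : ¬ ((labels.map PySem.Str.lower).contains (PySem.Str.lower f) = true) :=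
        fun h => hnm2 (List.contains_iff_mem.mp h)
      rw [if_neg hc2]
      rfl

-- ===== VERDICT (by name: the statement is the Claim_ definition above) =====
set_option maxHeartbeats 1000000 in
theorem resolve_focus_index_py_spec : Claim_equal_resolve_focus_index_py := by
  intro labels focus _hdom _hpre
  unfold Spec_resolve_focus_index_py
  cases focus with
  | none => rfl
  | some f0 =>
    show resolve_focus_index_py labels (some f0) = resolve_focus_index_py_alt labels (some f0)
    unfold resolve_focus_index_py resolve_focus_index_py_alt
    dsimp only
    by_cases h1 : PySem.Str.strip f0 = "" ∨ PySem.Str.lower (PySem.Str.strip f0) = "none" ∨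
        PySem.Str.lower (PySem.Str.strip f0) = "off" ∨ PySem.Str.lower (PySem.Str.strip f0) = "false"
    · rw [if_pos h1, if_pos h1]
    · rw [if_neg h1, if_neg h1]
      by_cases h2 : PySem.Str.lower (PySem.Str.strip f0) = "auto"
      · rw [if_pos h2, if_pos h2]
      · rw [if_neg h2, if_neg h2]
        by_cases h3 : PySem.Str.strIsdigit (PySem.Str.strip f0) = true
        · rw [if_pos h3, if_pos h3]
        · rw [if_neg h3, if_neg h3]
          exact tail_eq labels (PySem.Str.strip f0)
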